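-- pv_equiv track=rewrite | github.com/logxdx/deadly_python | py-codes/bracket_depth.py | correct_depth
-- ===== SOURCE A (Python) =====
-- def correct_depth(tokens):
--     stack = []
--     depth = 0
--
--     for token in tokens:
--         if token == '(':
--             stack.append('(')
--             depth += 1
--         elif token == ')':
--             if len(stack) == 0 or stack.pop() != '(':
--                 return False
--             depth -= 1
--         elif token.isdigit():
--             if int(token) != depth:
--                 return False
--         else:
--             return False
--
--     return len(stack) == 0
-- ===== SOURCE B (Python) =====
-- def correct_depth(tokens):
--     # Pass 1: build the list of prefix depths (depth before each token).
--     depths = [0]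
--     for t in tokens:
--         depths.append(depths[-1] + (1 if t == '(' else -1 if t == ')' else 0))
--     # Pass 2: final depth must be zero and every token must be valid at its depth.
--     if depths[-1] != 0:
--         return False
--     return all(
--         t == '(' or (t == ')' and d > 0) or (t.isdigit() and int(t) == d)
--         for t, d in zip(tokens, depths)
--     )
-- ===== Notes on version B (the rewrite author's own statement) =====
-- stated objective: alternative
-- what changed: Replaces A's single pass with a mutable stack and early returns by two staged passes: first materialise the prefix-depth list by a scan, then validate every (token, depth) pair with an all() over zip plus a final-depth==0 check.
import Mathlib
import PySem

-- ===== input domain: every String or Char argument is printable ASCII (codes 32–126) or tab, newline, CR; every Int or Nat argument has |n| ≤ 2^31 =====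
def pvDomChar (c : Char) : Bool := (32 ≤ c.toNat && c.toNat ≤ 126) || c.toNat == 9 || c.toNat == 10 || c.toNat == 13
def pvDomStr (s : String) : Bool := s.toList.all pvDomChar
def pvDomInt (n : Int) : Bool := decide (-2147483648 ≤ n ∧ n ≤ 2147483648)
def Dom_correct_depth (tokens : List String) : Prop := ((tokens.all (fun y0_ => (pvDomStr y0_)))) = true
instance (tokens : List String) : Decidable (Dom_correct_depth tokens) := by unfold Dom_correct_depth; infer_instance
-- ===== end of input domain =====

-- B replaces A's single stack-based pass with two staged passes: build the prefix-depth list, then validate all (token, depth) pairs.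


-- ===== PORT A =====
-- Loop over tokens carrying A's state (stack, depth); early 'return False' = result false.
def correct_depth_loopA : List String → List String → Int → Bool
  | [], stack, _ => stack.length == 0
  | t :: ts, stack, depth =>
    if t == "(" then correct_depth_loopA ts (stack ++ ["("]) (depth + 1)
    else if t == ")" then
      if stack.length == 0 then false
      else
        match PySem.List.pop? stack (-1) with   -- stack.pop()
        | none => false                          -- unreachable: stack nonempty
        | some (v, rest) =>
          if v != "(" then false
          else correct_depth_loopA ts rest (depth - 1)
    else if PySem.Str.strIsdigit t then          -- token.isdigit()
      if (PySem.Int.ofStr? t).getD 0 != depth then false   -- int(token); isdigit guarantees some on ASCII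
      else correct_depth_loopA ts stack depth
    else false

def correct_depth (tokens : List String) : Bool :=
  correct_depth_loopA tokens [] 0

-- ===== PORT B =====
-- Pass 1: fold building the prefix-depth list (depths[-1] = PySem.List.pyGet? … (-1)).
def correct_depth_altDepths (tokens : List String) : List Int :=
  tokens.foldl
    (fun ds t => ds ++ [(PySem.List.pyGet? ds (-1)).getD 0 +
        (if t == "(" then (1 : Int) else if t == ")" then -1 else 0)])
    [(0 : Int)]

-- Pass 2: final depth 0 and all (token, depth) pairs valid.
def correct_depth_alt (tokens : List String) : Bool :=
  let depths := correct_depth_altDepths tokens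
  if ((PySem.List.pyGet? depths (-1)).getD 0 != 0) then false
  else (tokens.zip depths).all (fun td =>
    td.1 == "(" || (td.1 == ")" && decide ((0 : Int) < td.2)) ||
    (PySem.Str.strIsdigit td.1 && ((PySem.Int.ofStr? td.1).getD 0 == td.2)))

-- ===== PRECONDITION & SPEC =====
def Spec_correct_depth (tokens : List String) (out : Bool) : Prop := out = correct_depth_alt tokens
instance (tokens : List String) (out : Bool) : Decidable (Spec_correct_depth tokens out) := by unfold Spec_correct_depth; infer_instance

-- ===== CLAIM (what is proved, stated in full; the proofs are below) =====
def Claim_equal_correct_depth : Prop := ∀ (tokens : List String), Dom_correct_depth tokens → Spec_correct_depth tokens (correct_depth tokens)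

-- ===== LEMMAS AND PROOFS =====
-- Step delta of a token.
def cdDelta (t : String) : Int := if t == "(" then 1 else if t == ")" then -1 else 0

-- The prefix-depth list starting at d.
def cdDepths : List String → Int → List Int
  | [], d => [d]
  | t :: ts, d => d :: cdDepths ts (d + cdDelta t)

-- Fused check (common spec of both programs).
def cdG : List String → Int → Bool
  | [], d => d == 0
  | t :: ts, d =>
    if t == "(" then cdG ts (d + 1)
    else if t == ")" then decide ((0 : Int) < d) && cdG ts (d - 1)
    else (PySem.Str.strIsdigit t && ((PySem.Int.ofStr? t).getD 0 == d)) && cdG ts d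

-- pyGet? (-1) skips a cons in front of a (nonempty) cdDepths list.
theorem cd_pyGet_neg_one_cons (ts : List String) (d e : Int) :
    PySem.List.pyGet? (e :: cdDepths ts d) (-1) = PySem.List.pyGet? (cdDepths ts d) (-1) := by
  cases ts <;> simp [cdDepths, PySem.List.pyGet?_neg_one]

-- The fold builds ds ++ cdDepths ts d when started from ds ++ [d].
theorem cd_fold_eq (ts : List String) : ∀ (ds : List Int) (d : Int),
    ts.foldl
      (fun ds t => ds ++ [(PySem.List.pyGet? ds (-1)).getD 0 +
          (if t == "(" then (1 : Int) else if t == ")" then -1 else 0)])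
      (ds ++ [d]) = ds ++ cdDepths ts d := by
  induction ts with
  | nil => intro ds d; simp [cdDepths]
  | cons t ts ih =>
    intro ds d
    have h := ih (ds ++ [d]) (d + cdDelta t)
    simp only [List.foldl_cons, PySem.List.pyGet?_neg_one_append_singleton, Option.getD_some]
    rw [show (ds ++ [d]) ++ [d + (if t == "(" then (1:Int) else if t == ")" then -1 else 0)]
        = (ds ++ [d]) ++ [d + cdDelta t] from by simp [cdDelta]]
    rw [h]
    simp [cdDepths]

theorem cd_altDepths (ts : List String) : correct_depth_altDepths ts = cdDepths ts 0 := by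
  have := cd_fold_eq ts [] 0
  simpa [correct_depth_altDepths] using this

-- alt's staged check, generalized over the starting depth, equals cdG.
theorem cd_alt_eq_g (ts : List String) : ∀ d : Int,
    (if ((PySem.List.pyGet? (cdDepths ts d) (-1)).getD 0 != 0) then false
     else ((ts.zip (cdDepths ts d)).all (fun td =>
       td.1 == "(" || (td.1 == ")" && decide ((0 : Int) < td.2)) ||
       (PySem.Str.strIsdigit td.1 && ((PySem.Int.ofStr? td.1).getD 0 == td.2))))) = cdG ts d := by
  induction ts with
  | nil =>
    intro d
    by_cases h : d = 0 <;> simp [cdDepths, cdG, PySem.List.pyGet?_neg_one, h]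
  | cons t ts ih =>
    intro d
    by_cases h1 : t = "("
    · subst h1
      rw [show cdDepths ("(" :: ts) d = d :: cdDepths ts (d + 1) from by
            simp [cdDepths, cdDelta]]
      rw [show cdG ("(" :: ts) d = cdG ts (d + 1) from by simp [cdG]]
      rw [cd_pyGet_neg_one_cons, ← ih (d + 1)]
      by_cases hz : ((PySem.List.pyGet? (cdDepths ts (d + 1)) (-1)).getD 0) = 0 <;>
        simp [hz]
    · by_cases h2 : t = ")"
      · subst h2
        rw [show cdDepths (")" :: ts) d = d :: cdDepths ts (d - 1) from by
              simp [cdDepths, cdDelta, sub_eq_add_neg]]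
        rw [show cdG (")" :: ts) d = (decide ((0:Int) < d) && cdG ts (d - 1)) from by
              simp [cdG]]
        rw [cd_pyGet_neg_one_cons, ← ih (d - 1)]
        have hdig : PySem.Chars.strIsdigit [')'] = false := by decide
        by_cases hz : ((PySem.List.pyGet? (cdDepths ts (d - 1)) (-1)).getD 0) = 0 <;>
          by_cases hd : (0 : Int) < d <;> simp [hz, hd, hdig]
      · rw [show cdDepths (t :: ts) d = d :: cdDepths ts d from by
              simp [cdDepths, cdDelta, h1, h2]]
        rw [show cdG (t :: ts) d
              = ((PySem.Chars.strIsdigit t.toList && ((PySem.Int.ofStr? t).getD 0 == d))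
                  && cdG ts d) from by simp [cdG, h1, h2]]
        rw [cd_pyGet_neg_one_cons, ← ih d]
        have hb1 : (t == "(") = false := by simp [h1]
        have hb2 : (t == ")") = false := by simp [h2]
        by_cases hz : ((PySem.List.pyGet? (cdDepths ts d) (-1)).getD 0) = 0 <;>
          cases hdig : PySem.Chars.strIsdigit t.toList <;>
            by_cases he : (PySem.Int.ofStr? t).getD 0 = d <;>
              simp [hz, hdig, he, hb1, hb2]

theorem cd_alt_eq (ts : List String) : correct_depth_alt ts = cdG ts 0 := by
  rw [correct_depth_alt]
  simp only [cd_altDepths]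
  exact cd_alt_eq_g ts 0

-- A's stack is always a pile of n '('s and its depth equals n; then loopA = cdG.
theorem cd_loopA_eq_g (ts : List String) :
    ∀ n : Nat, correct_depth_loopA ts (List.replicate n "(") (n : Int) = cdG ts (n : Int) := by
  induction ts with
  | nil => intro n; simp [correct_depth_loopA, cdG]
  | cons t ts ih =>
    intro n
    by_cases h1 : t = "("
    · have := ih (n + 1)
      simp [correct_depth_loopA, cdG, h1, List.replicate_succ' (n := n)] at this ⊢
      simpa [add_comm] using this
    · by_cases h2 : t = ")"
      · cases n with
        | zero => simp [correct_depth_loopA, cdG, h2]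
        | succ m =>
          have hpop : PySem.List.pop? (List.replicate (m + 1) "(") (-1) =
              some ("(", List.replicate m "(") := by
            simpa [List.replicate_succ' (n := m)] using
              PySem.List.pop?_last (xs := List.replicate m "(") (x := "(")
          have := ih m
          have hpos : (0 : Int) < (m : Int) + 1 := by positivity
          simp [correct_depth_loopA, cdG, h2, hpop, hpos] at this ⊢
          simpa using this
      · cases hdig : PySem.Chars.strIsdigit t.toList <;>
          by_cases he : (PySem.Int.ofStr? t).getD 0 = (n : Int) <;>
            simp [correct_depth_loopA, cdG, h1, h2, hdig, he, ih n]

-- ===== VERDICT (by name: the statement is the Claim_ definition above) =====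
theorem correct_depth_spec : Claim_equal_correct_depth := by
  intro tokens _
  unfold Spec_correct_depth correct_depth
  rw [cd_alt_eq]
  simpa using cd_loopA_eq_g tokens 0
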